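-- pv_equiv track=rewrite | github.com/Sam-dev-eng/python-asignments | chapter 1 to 4/code_leveling.py | prodect_square
-- ===== SOURCE A (Python) =====
-- def value_error_for_list(element):
--    if type(element) != list:
--       raise ValueError
--
-- def value_error_for_length(element):
--    if len(element) == 0:
--       raise ValueError
--
-- def value_error_for_int(element):
--    if type(element) != int:
--      raise ValueError
--
-- def square_num(numbers):
--   return numbers**2
--
-- def product_num(number_one,number_two):
--   return number_one * number_two
--
-- def prodect_square(list_of_numbers):
--    from functools import reduce
--    value_error_for_list(list_of_numbers)
--    value_error_for_length(list_of_numbers)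
--    for elements in list_of_numbers:
--      value_error_for_int(elements)
--    square_numbers = list(map(square_num,list_of_numbers))
--    return reduce(product_num , square_numbers)
-- ===== SOURCE B (Python) =====
-- def prodect_square(list_of_numbers):
--     # Uses the identity prod(x**2 for x) == (prod(x for x))**2:
--     # compute the plain product once, square it at the end.
--     if type(list_of_numbers) != list:
--         raise ValueError
--     if len(list_of_numbers) == 0:
--         raise ValueError
--     product = 1
--     for x in list_of_numbers:
--         if type(x) != int:
--             raise ValueError
--         product *= x
--     return product * product
-- ===== Notes on version B (the rewrite author's own statement) =====
-- stated objective: alternative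
-- what changed: Instead of squaring each element and reducing the list of squares, B uses the identity prod(x^2) = (prod x)^2: one plain-product pass over the elements and a single final squaring, dropping A's map/reduce/helper decomposition.
import Mathlib
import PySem

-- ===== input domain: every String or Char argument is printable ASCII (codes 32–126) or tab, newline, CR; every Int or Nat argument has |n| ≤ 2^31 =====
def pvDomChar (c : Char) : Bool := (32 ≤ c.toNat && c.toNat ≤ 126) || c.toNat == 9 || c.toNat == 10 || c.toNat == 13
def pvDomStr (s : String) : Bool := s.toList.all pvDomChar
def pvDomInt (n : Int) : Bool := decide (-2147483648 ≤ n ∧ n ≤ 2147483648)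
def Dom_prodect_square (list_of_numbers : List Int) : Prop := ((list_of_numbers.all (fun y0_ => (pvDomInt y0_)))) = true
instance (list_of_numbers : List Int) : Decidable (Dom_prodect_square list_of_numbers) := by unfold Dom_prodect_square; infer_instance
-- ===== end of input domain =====

-- B computes the plain product in one pass and squares it once at the end (prod(x^2) = (prod x)^2),
-- instead of A's square-each-element map followed by a reduce. Both raise ValueError on []; Pre_ excludes it.

-- ===== PORT A =====
def square_num (numbers : Int) : Int := numbers ^ 2

def product_num (number_one number_two : Int) : Int := number_one * number_two

-- reduce(product_num, xs) with no initializer: head is the seed (empty case excluded by Pre_)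
def prodect_square (list_of_numbers : List Int) : Int :=
  let square_numbers := list_of_numbers.map square_num
  match square_numbers with
  | [] => 0  -- unreachable under Pre_ (Python raises ValueError earlier)
  | h :: t => t.foldl product_num h

-- ===== PORT B =====
def prodect_square_alt (list_of_numbers : List Int) : Int :=
  let product := list_of_numbers.foldl (fun product x => product * x) 1
  product * product

-- ===== PRECONDITION & SPEC =====
-- A raises ValueError on the empty list; Pre_ excludes exactly that.
def Pre_prodect_square (list_of_numbers : List Int) : Prop := list_of_numbers ≠ []
instance (list_of_numbers : List Int) : Decidable (Pre_prodect_square list_of_numbers) := by unfold Pre_prodect_square; infer_instance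
def pvWitness_prodect_square : List Int := ([2, -3])

def Spec_prodect_square (list_of_numbers : List Int) (out : Int) : Prop := out = prodect_square_alt list_of_numbers
instance (list_of_numbers : List Int) (out : Int) : Decidable (Spec_prodect_square list_of_numbers out) := by unfold Spec_prodect_square; infer_instance

-- ===== CLAIM =====
def Claim_equal_prodect_square : Prop := ∀ (list_of_numbers : List Int), Dom_prodect_square list_of_numbers → Pre_prodect_square list_of_numbers → Spec_prodect_square list_of_numbers (prodect_square list_of_numbers)

-- ===== LEMMAS AND PROOFS =====
lemma foldl_mul_shift (t : List Int) (a : Int) :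
    t.foldl (fun p x => p * x) a = a * t.foldl (fun p x => p * x) 1 := by
  induction t generalizing a with
  | nil => simp
  | cons h t ih =>
    simp only [List.foldl_cons]
    rw [ih (a * h), ih (1 * h)]
    ring

lemma reduce_sq (t : List Int) (a : Int) :
    (t.map square_num).foldl product_num a =
      a * (t.foldl (fun p x => p * x) 1) ^ 2 := by
  induction t generalizing a with
  | nil => simp
  | cons y t ih =>
    simp only [List.map_cons, List.foldl_cons, product_num, square_num]
    rw [ih (a * y ^ 2), foldl_mul_shift t (1 * y)]
    ring

-- ===== VERDICT =====
theorem prodect_square_spec : Claim_equal_prodect_square := by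
  intro l _ hpre
  unfold Spec_prodect_square prodect_square prodect_square_alt
  match l with
  | [] => exact absurd rfl hpre
  | h :: t =>
    simp only [List.map_cons, List.foldl_cons]
    rw [reduce_sq t (square_num h), foldl_mul_shift t (1 * h)]
    simp only [square_num]
    ring
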